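-- pv_equiv track=rewrite | github.com/BenWiederhake/aoc2023 | 2024/day10/solve_part2.py | find_next_counts
-- ===== SOURCE A (Python) =====
-- from collections import defaultdict
--
-- ORTHOGONAL_NEIGHBORS = [
--     (1, 0),
--     (0, 1),
--     (-1, 0),
--     (0, -1),
-- ]
--
-- def find_next_counts(current_counts, level_map, next_level_str):
--     counts = defaultdict(int)
--     w, h = len(level_map[0]), len(level_map)
--     for (col_no, row_no), cell_count in current_counts.items():
--         for dx, dy in ORTHOGONAL_NEIGHBORS:
--             n_col_no, n_row_no = col_no + dx, row_no + dy
--             if not (0 <= n_col_no < w and 0 <= n_row_no < h):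
--                 # Can't continue a trail outside the map
--                 continue
--             n_char = level_map[n_row_no][n_col_no]
--             if n_char != next_level_str:
--                 # Wrong height
--                 continue
--             # Works!
--             counts[(n_col_no, n_row_no)] += cell_count
--     return counts
-- ===== SOURCE B (Python) =====
-- ORTHOGONAL_NEIGHBORS = [
--     (1, 0),
--     (0, 1),
--     (-1, 0),
--     (0, -1),
-- ]
--
-- def find_next_counts(current_counts, level_map, next_level_str):
--     w, h = len(level_map[0]), len(level_map)
--     edges = [((col + dx, row + dy), cnt)
--              for (col, row), cnt in current_counts.items()
--              for dx, dy in ORTHOGONAL_NEIGHBORS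
--              if 0 <= col + dx < w and 0 <= row + dy < h
--              and level_map[row + dy][col + dx] == next_level_str]
--     keys = dict.fromkeys(k for k, _ in edges)
--     return {key: sum(v for k, v in edges if k == key) for key in keys}
-- ===== Notes on version B (the rewrite author's own statement) =====
-- stated objective: alternative
-- what changed: Replaces the mutable defaultdict scatter (nested loops doing counts[target] += cnt) by a comprehension-built edge list followed by a group-by aggregation: dedup of target keys in first-occurrence order, then one sum per key.
import Mathlib
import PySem

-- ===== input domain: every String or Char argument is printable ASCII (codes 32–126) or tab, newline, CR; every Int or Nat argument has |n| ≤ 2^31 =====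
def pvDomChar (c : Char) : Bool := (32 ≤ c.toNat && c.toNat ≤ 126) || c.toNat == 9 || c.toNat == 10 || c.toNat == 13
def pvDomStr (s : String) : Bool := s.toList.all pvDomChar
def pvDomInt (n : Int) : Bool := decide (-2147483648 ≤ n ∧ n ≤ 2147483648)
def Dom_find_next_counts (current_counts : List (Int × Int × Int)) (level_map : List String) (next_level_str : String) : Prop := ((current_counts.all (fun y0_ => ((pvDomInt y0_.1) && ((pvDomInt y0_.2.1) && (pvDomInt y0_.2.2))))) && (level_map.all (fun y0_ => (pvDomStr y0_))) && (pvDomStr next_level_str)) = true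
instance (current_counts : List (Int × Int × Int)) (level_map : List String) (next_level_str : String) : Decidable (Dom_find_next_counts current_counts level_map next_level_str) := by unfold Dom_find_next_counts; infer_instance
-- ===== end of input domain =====

-- B replaces A's mutable defaultdict scatter by a comprehension-built edge list followed by a
-- group-by-key aggregation (dedup of targets in first-occurrence order, then a sum per key);
-- objective: alternative decomposition, same asymptotic behaviour on these tiny AoC grids.
-- The dict argument/result are List-encoded; equivalence is about the return value (A mutates nothing).

-- ===== PORT A =====
def pvOrth : List (Int × Int) := [(1, 0), (0, 1), (-1, 0), (0, -1)]

def find_next_counts (current_counts : List (Int × Int × Int)) (level_map : List String) (next_level_str : String) : List (Int × Int × Int) :=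
  let w : Int := ((PySem.List.pyGetD level_map 0 "").toList.length : Int)
  let h : Int := (level_map.length : Int)
  let counts : PySem.Dict (Int × Int) Int :=
    current_counts.foldl (fun d e =>
      pvOrth.foldl (fun d dd =>
        let nc := e.1 + dd.1
        let nr := e.2.1 + dd.2
        if ¬ (0 ≤ nc ∧ nc < w ∧ 0 ≤ nr ∧ nr < h) then d
        else
          let nch := PySem.List.pyGetD (PySem.List.pyGetD level_map nr "").toList nc ' '
          if [nch] ≠ next_level_str.toList then d
          else d.modify (nc, nr) 0 (· + e.2.2)) d)
      PySem.Dict.empty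
  counts.items.map (fun p => (p.1.1, p.1.2, p.2))

-- ===== PORT B =====
-- the edge comprehension of Source B: all (target, count) contributions, in source-then-neighbor order
def pvEdges (current_counts : List (Int × Int × Int)) (level_map : List String) (next_level_str : String) : List ((Int × Int) × Int) :=
  let w : Int := ((PySem.List.pyGetD level_map 0 "").toList.length : Int)
  let h : Int := (level_map.length : Int)
  current_counts.flatMap (fun e =>
    pvOrth.filterMap (fun dd =>
      let nc := e.1 + dd.1
      let nr := e.2.1 + dd.2
      if (0 ≤ nc ∧ nc < w ∧ 0 ≤ nr ∧ nr < h) ∧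
          [PySem.List.pyGetD (PySem.List.pyGetD level_map nr "").toList nc ' '] = next_level_str.toList
      then some ((nc, nr), e.2.2) else none))

def find_next_counts_alt (current_counts : List (Int × Int × Int)) (level_map : List String) (next_level_str : String) : List (Int × Int × Int) :=
  let edges := pvEdges current_counts level_map next_level_str
  (PySem.List.dedup (edges.map (·.1))).map (fun k =>
    (k.1, k.2, ((edges.filter (fun p => p.1 == k)).map (·.2)).sum))

-- ===== PRECONDITION & SPEC =====
-- Pre_ excludes (a) inputs where Python A raises an IndexError — an empty level_map, or an
-- in-bounds matched neighbor column that exceeds its (ragged) row's actual length — and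
-- (b) association lists with duplicate (col,row) keys, which no Python dict can represent.
def Pre_find_next_counts (current_counts : List (Int × Int × Int)) (level_map : List String) (next_level_str : String) : Prop :=
  level_map ≠ [] ∧
  (current_counts.map (fun e => (e.1, e.2.1))).Nodup ∧
  ∀ e ∈ current_counts, ∀ dd ∈ pvOrth,
    (0 ≤ e.1 + dd.1 ∧ e.1 + dd.1 < ((PySem.List.pyGetD level_map 0 "").toList.length : Int) ∧
     0 ≤ e.2.1 + dd.2 ∧ e.2.1 + dd.2 < (level_map.length : Int)) →
    (e.1 + dd.1).toNat < (PySem.List.pyGetD level_map (e.2.1 + dd.2) "").toList.length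
instance (current_counts : List (Int × Int × Int)) (level_map : List String) (next_level_str : String) : Decidable (Pre_find_next_counts current_counts level_map next_level_str) := by unfold Pre_find_next_counts; infer_instance

def pvWitness_find_next_counts : (List (Int × Int × Int)) × List String × String :=
  ([(0, 0, 2), (1, 1, 3)], ["01", "10"], "1")

def Spec_find_next_counts (current_counts : List (Int × Int × Int)) (level_map : List String) (next_level_str : String) (out : List (Int × Int × Int)) : Prop := out = find_next_counts_alt current_counts level_map next_level_str
instance (current_counts : List (Int × Int × Int)) (level_map : List String) (next_level_str : String) (out : List (Int × Int × Int)) : Decidable (Spec_find_next_counts current_counts level_map next_level_str out) := by unfold Spec_find_next_counts; infer_instance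

-- ===== CLAIM (what is proved, stated in full; the proofs are below) =====
def Claim_equal_find_next_counts : Prop := ∀ (current_counts : List (Int × Int × Int)) (level_map : List String) (next_level_str : String), Dom_find_next_counts current_counts level_map next_level_str → Pre_find_next_counts current_counts level_map next_level_str → Spec_find_next_counts current_counts level_map next_level_str (find_next_counts current_counts level_map next_level_str)

-- ===== LEMMAS AND PROOFS =====

-- the scatter step of A
def pvStep (d : PySem.Dict (Int × Int) Int) (p : (Int × Int) × Int) : PySem.Dict (Int × Int) Int :=
  d.modify p.1 0 (· + p.2)

-- one source cell's contributions: A's inner neighbor fold is the scatter over its filterMap edges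
theorem pv_inner_eq (level_map : List String) (next_level_str : String) (e : Int × Int × Int) (d : PySem.Dict (Int × Int) Int) :
    pvOrth.foldl (fun d dd =>
        let nc := e.1 + dd.1
        let nr := e.2.1 + dd.2
        if ¬ (0 ≤ nc ∧ nc < ((PySem.List.pyGetD level_map 0 "").toList.length : Int) ∧ 0 ≤ nr ∧ nr < (level_map.length : Int)) then d
        else
          let nch := PySem.List.pyGetD (PySem.List.pyGetD level_map nr "").toList nc ' '
          if [nch] ≠ next_level_str.toList then d
          else d.modify (nc, nr) 0 (· + e.2.2)) d
    = (pvOrth.filterMap (fun dd =>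
        let nc := e.1 + dd.1
        let nr := e.2.1 + dd.2
        if (0 ≤ nc ∧ nc < ((PySem.List.pyGetD level_map 0 "").toList.length : Int) ∧ 0 ≤ nr ∧ nr < (level_map.length : Int)) ∧
            [PySem.List.pyGetD (PySem.List.pyGetD level_map nr "").toList nc ' '] = next_level_str.toList
        then some ((nc, nr), e.2.2) else none)).foldl pvStep d := by
  rw [List.foldl_filterMap]
  apply List.foldl_ext
  intro d dd _
  dsimp only []
  split_ifs <;> first | rfl | tauto

-- A's nested fold is the flat scatter over B's edge list
theorem pv_foldl_eq_scatter (current_counts : List (Int × Int × Int)) (level_map : List String) (next_level_str : String) (d : PySem.Dict (Int × Int) Int) :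
    current_counts.foldl (fun d e =>
      pvOrth.foldl (fun d dd =>
        let nc := e.1 + dd.1
        let nr := e.2.1 + dd.2
        if ¬ (0 ≤ nc ∧ nc < ((PySem.List.pyGetD level_map 0 "").toList.length : Int) ∧ 0 ≤ nr ∧ nr < (level_map.length : Int)) then d
        else
          let nch := PySem.List.pyGetD (PySem.List.pyGetD level_map nr "").toList nc ' '
          if [nch] ≠ next_level_str.toList then d
          else d.modify (nc, nr) 0 (· + e.2.2)) d) d
    = (pvEdges current_counts level_map next_level_str).foldl pvStep d := by
  induction current_counts generalizing d with
  | nil => simp [pvEdges]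
  | cons e cc ih =>
    rw [List.foldl_cons, pv_inner_eq]
    rw [ih]
    rw [show pvEdges (e :: cc) level_map next_level_str
        = (pvOrth.filterMap (fun dd =>
            let nc := e.1 + dd.1
            let nr := e.2.1 + dd.2
            if (0 ≤ nc ∧ nc < ((PySem.List.pyGetD level_map 0 "").toList.length : Int) ∧ 0 ≤ nr ∧ nr < (level_map.length : Int)) ∧
                [PySem.List.pyGetD (PySem.List.pyGetD level_map nr "").toList nc ' '] = next_level_str.toList
            then some ((nc, nr), e.2.2) else none)) ++ pvEdges cc level_map next_level_str
        from by simp [pvEdges]]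
    rw [List.foldl_append]

-- value accumulated by the scatter at a key
theorem pv_getD_scatter (es : List ((Int × Int) × Int)) (d : PySem.Dict (Int × Int) Int) (k : Int × Int) :
    (es.foldl pvStep d).getD k 0 = d.getD k 0 + ((es.filter (fun p => p.1 == k)).map (·.2)).sum := by
  induction es generalizing d with
  | nil => simp
  | cons p es ih =>
    rw [List.foldl_cons, ih]
    by_cases hk : p.1 = k
    · simp [pvStep, hk]
      ring
    · simp [pvStep, PySem.Dict.getD_modify, hk, Ne.symm hk]

-- the scattered dict, listed out, is B's group-by
theorem pv_scatter_items (es : List ((Int × Int) × Int)) :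
    (es.foldl pvStep PySem.Dict.empty).items
      = (PySem.List.dedup (es.map (·.1))).map (fun k => (k, ((es.filter (fun p => p.1 == k)).map (·.2)).sum)) := by
  have hkeys : (es.foldl pvStep PySem.Dict.empty).keys = PySem.Set.update ([] : List (Int × Int)) (es.map (·.1)) := by
    simpa [pvStep, PySem.Dict.keys_empty] using PySem.Dict.keys_foldl_modify_key es (·.1) (0 : Int) (fun _ p => (· + p.2)) PySem.Dict.empty
  have hnd : (es.foldl pvStep PySem.Dict.empty).keys.Nodup := by
    simpa [pvStep] using PySem.Dict.nodup_keys_foldl_modify_key es (·.1) (0 : Int) (fun _ p => (· + p.2)) PySem.Dict.empty (by simp)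
  rw [PySem.Dict.items_eq_map_keys _ hnd (0 : Int), hkeys]
  have : PySem.Set.update ([] : List (Int × Int)) (es.map (·.1)) = PySem.List.dedup (es.map (·.1)) := by
    rw [PySem.List.dedup_eq_ofList]; rfl
  rw [this]
  apply List.map_congr_left
  intro k _
  rw [pv_getD_scatter]
  simp

-- ===== VERDICT (by name: the statement is the Claim_ definition above) =====
theorem find_next_counts_spec : Claim_equal_find_next_counts := by
  intro cc lm nl _ _
  unfold Spec_find_next_counts find_next_counts find_next_counts_alt
  dsimp only []
  rw [pv_foldl_eq_scatter, pv_scatter_items]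
  simp [List.map_map]
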